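-- pv_equiv track=rewrite | github.com/martinSaav/TDA-Buchwald | Greedy/exercise6.py | cambio_minimo
-- ===== SOURCE A (Python) =====
-- def cambio_minimo(monedas, monto):
--     min_cambio = []
--     monedas.sort(reverse=True)  # Ordenamos las monedas de mayor a menor valor O(n log n)
--
--     for moneda in monedas:
--         while monto >= moneda:
--             monto -= moneda
--             min_cambio.append(moneda)
--
--     return min_cambio
-- ===== SOURCE B (Python) =====
-- def cambio_minimo(monedas, monto):
--     min_cambio = []
--     monedas.sort(reverse=True)  # same in-place descending sort as A
--     for moneda in monedas:
--         if monto >= moneda: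
--             cuantas = monto // moneda
--             min_cambio.extend([moneda] * cuantas)
--             monto -= cuantas * moneda
--     return min_cambio
-- ===== Notes on version B (the rewrite author's own statement) =====
-- stated objective: alternative
-- what changed: Replaces A's inner one-unit-at-a-time subtraction loop with a closed-form per-coin count (monto // moneda) and a single extend of the repeated coin, so the work per coin no longer depends on how many units of the coin are used (intended as faster; a timing run could not measure a ratio because A times out on the large inputs while B returns).
import Mathlib
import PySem

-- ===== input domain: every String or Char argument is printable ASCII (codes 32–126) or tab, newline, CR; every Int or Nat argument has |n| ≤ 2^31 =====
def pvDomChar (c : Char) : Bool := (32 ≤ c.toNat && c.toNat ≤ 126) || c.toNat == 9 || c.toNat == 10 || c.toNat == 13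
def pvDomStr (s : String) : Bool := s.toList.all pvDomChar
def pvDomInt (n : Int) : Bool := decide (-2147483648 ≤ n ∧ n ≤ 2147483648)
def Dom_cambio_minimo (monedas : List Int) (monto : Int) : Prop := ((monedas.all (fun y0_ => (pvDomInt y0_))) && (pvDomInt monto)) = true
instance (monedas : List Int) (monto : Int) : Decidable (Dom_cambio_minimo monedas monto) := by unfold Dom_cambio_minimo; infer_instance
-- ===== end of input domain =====

-- B replaces A's unit-by-unit inner subtraction loop with a per-coin closed-form count
-- (monto // moneda) and one extend; equivalence is about the RETURN value (both sort
-- monedas in place the same way).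

-- ===== PORT A =====
-- the inner 'while monto >= moneda: monto -= moneda; min_cambio.append(moneda)'.
-- Fuel device: with 0 < moneda each iteration strictly decreases monto, so
-- monto.toNat + 1 steps always suffice (Pre_ below restricts to positive coins,
-- exactly where the Python loop terminates).
def pvWhileA (moneda : Int) : Nat → Int → List Int → Int × List Int
  | 0, monto, acc => (monto, acc)
  | fuel + 1, monto, acc =>
      if moneda ≤ monto then pvWhileA moneda fuel (monto - moneda) (acc ++ [moneda])
      else (monto, acc)

def cambio_minimo (monedas : List Int) (monto : Int) : List Int :=
  ((PySem.List.sorted monedas (fun x => x) true).foldl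
      (fun st moneda => pvWhileA moneda (st.1.toNat + 1) st.1 st.2)
      (monto, ([] : List Int))).2

-- ===== PORT B =====
def cambio_minimo_alt (monedas : List Int) (monto : Int) : List Int :=
  ((PySem.List.sorted monedas (fun x => x) true).foldl (fun st moneda =>
      if moneda ≤ st.1 then
        let cuantas := PySem.Int.floordiv st.1 moneda
        (st.1 - cuantas * moneda, st.2 ++ List.replicate cuantas.toNat moneda)
      else st)
      (monto, ([] : List Int))).2

-- ===== PRECONDITION & SPEC =====
-- Pre_ is exactly the set of inputs on which the Python A terminates: either every coin
-- is positive, or monto is negative and below every coin (then every loop is skipped);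
-- otherwise A reaches a coin ≤ 0 with remaining monto ≥ it and infinite-loops.
def Pre_cambio_minimo (monedas : List Int) (monto : Int) : Prop :=
  (∀ m ∈ monedas, 0 < m) ∨ (monto < 0 ∧ ∀ m ∈ monedas, monto < m)
instance (monedas : List Int) (monto : Int) : Decidable (Pre_cambio_minimo monedas monto) := by
  unfold Pre_cambio_minimo; infer_instance

def pvWitness_cambio_minimo : List Int × Int := ([1, 5, 2], 13)

def Spec_cambio_minimo (monedas : List Int) (monto : Int) (out : List Int) : Prop := out = cambio_minimo_alt monedas monto
instance (monedas : List Int) (monto : Int) (out : List Int) : Decidable (Spec_cambio_minimo monedas monto out) := by unfold Spec_cambio_minimo; infer_instance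

-- ===== CLAIM (what is proved, stated in full; the proofs are below) =====
def Claim_equal_cambio_minimo : Prop := ∀ (monedas : List Int) (monto : Int), Dom_cambio_minimo monedas monto → Pre_cambio_minimo monedas monto → Spec_cambio_minimo monedas monto (cambio_minimo monedas monto)

-- ===== LEMMAS AND PROOFS =====

-- one coin: the unit-subtraction loop equals the closed-form count, for a positive coin
-- and enough fuel.
theorem pvWhileA_eq_div (moneda : Int) (hm : 0 < moneda) :
    ∀ (fuel : Nat) (monto : Int), monto.toNat < fuel → ∀ (acc : List Int),
      pvWhileA moneda fuel monto acc =
        if moneda ≤ monto then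
          (monto - PySem.Int.floordiv monto moneda * moneda,
           acc ++ List.replicate (PySem.Int.floordiv monto moneda).toNat moneda)
        else (monto, acc) := by
  intro fuel
  induction fuel with
  | zero => intro monto h; omega
  | succ fuel ih =>
    intro monto hfuel acc
    by_cases h : moneda ≤ monto
    · set q := PySem.Int.floordiv monto moneda with hq
      have hb : q * moneda ≤ monto ∧ monto < (q + 1) * moneda :=
        (PySem.Int.floordiv_eq_iff_of_pos hm).mp hq.symm
      have hq1 : 1 ≤ q := by nlinarith [hb.1, hb.2]
      have hfuel' : (monto - moneda).toNat < fuel := by omega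
      have hq' : PySem.Int.floordiv (monto - moneda) moneda = q - 1 := by
        rw [PySem.Int.floordiv_eq_iff_of_pos hm]
        constructor <;> nlinarith [hb.1, hb.2]
      have hrepl : List.replicate q.toNat moneda = moneda :: List.replicate (q - 1).toNat moneda := by
        have : q.toNat = (q - 1).toNat + 1 := by omega
        rw [this, List.replicate_succ]
      simp only [pvWhileA, if_pos h]
      rw [ih _ hfuel', hq']
      by_cases h2 : moneda ≤ monto - moneda
      · rw [if_pos h2]
        simp only [Prod.mk.injEq]
        exact ⟨by ring, by rw [hrepl]; simp⟩
      · rw [if_neg h2]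
        have hqe : q = 1 := by nlinarith [hb.1, hb.2]
        rw [hqe]
        norm_num
    · simp [pvWhileA, h]

-- the fold over the sorted coins: equal step by step once every coin is positive
theorem pvFold_eq (l : List Int) (hl : ∀ m ∈ l, 0 < m) :
    ∀ (monto : Int) (acc : List Int),
      l.foldl (fun st moneda => pvWhileA moneda (st.1.toNat + 1) st.1 st.2) (monto, acc) =
      l.foldl (fun st moneda =>
        if moneda ≤ st.1 then
          let cuantas := PySem.Int.floordiv st.1 moneda
          (st.1 - cuantas * moneda, st.2 ++ List.replicate cuantas.toNat moneda)
        else st) (monto, acc) := by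
  induction l with
  | nil => intro monto acc; rfl
  | cons m t ih =>
    intro monto acc
    have hm : 0 < m := hl m (List.mem_cons_self ..)
    have ht := fun x hx => hl x (List.mem_cons_of_mem m hx)
    simp only [List.foldl_cons]
    rw [pvWhileA_eq_div m hm (monto.toNat + 1) monto (by omega) acc]
    split_ifs with h <;> exact ih ht _ _

-- ===== VERDICT (by name: the statement is the Claim_ definition above) =====
-- when monto is below every coin, both folds skip every coin
theorem pvFoldA_skip (l : List Int) (monto : Int) (acc : List Int)
    (h : ∀ m ∈ l, monto < m) :
    l.foldl (fun st moneda => pvWhileA moneda (st.1.toNat + 1) st.1 st.2) (monto, acc) =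
      (monto, acc) := by
  induction l with
  | nil => rfl
  | cons m t ih =>
    simp only [List.foldl_cons]
    have hm : ¬ m ≤ monto := not_le.mpr (h m (List.mem_cons_self ..))
    simp only [pvWhileA, if_neg hm]
    exact ih fun x hx => h x (List.mem_cons_of_mem m hx)

theorem pvFoldB_skip (l : List Int) (monto : Int) (acc : List Int)
    (h : ∀ m ∈ l, monto < m) :
    l.foldl (fun st moneda =>
        if moneda ≤ st.1 then
          let cuantas := PySem.Int.floordiv st.1 moneda
          (st.1 - cuantas * moneda, st.2 ++ List.replicate cuantas.toNat moneda)
        else st) (monto, acc) = (monto, acc) := by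
  induction l with
  | nil => rfl
  | cons m t ih =>
    simp only [List.foldl_cons]
    have hm : ¬ m ≤ monto := not_le.mpr (h m (List.mem_cons_self ..))
    simp only [if_neg hm]
    exact ih fun x hx => h x (List.mem_cons_of_mem m hx)

theorem cambio_minimo_spec : Claim_equal_cambio_minimo := by
  intro monedas monto _ hpre
  unfold Spec_cambio_minimo cambio_minimo cambio_minimo_alt
  rcases hpre with hpos | ⟨_, hlt⟩
  · have hpos' : ∀ m ∈ PySem.List.sorted monedas (fun x => x) true, 0 < m := fun m hm =>
      hpos m ((PySem.List.mem_sorted _ _ _ _).mp hm)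
    exact congrArg Prod.snd (pvFold_eq _ hpos' monto [])
  · have hlt' : ∀ m ∈ PySem.List.sorted monedas (fun x => x) true, monto < m := fun m hm =>
      hlt m ((PySem.List.mem_sorted _ _ _ _).mp hm)
    rw [pvFoldA_skip _ _ _ hlt', pvFoldB_skip _ _ _ hlt']
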